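-- pv_equiv track=rewrite | github.com/kartic03/DBS-Candidacy-Screening | xai/lime_analysis.py | build_modality_map
-- ===== SOURCE A (Python) =====
-- from typing import Dict, List, Optional, Tuple
--
-- def build_modality_map(
--     feature_cols: List[str],
--     wearable_cols: List[str],
--     voice_cols: List[str],
--     gait_cols: List[str],
-- ) -> Dict[str, str]:
--     """Map each feature name to its modality label."""
--     mod_map = {}
--     for c in feature_cols:
--         if c in wearable_cols:
--             mod_map[c] = "Wearable"
--         elif c in voice_cols:
--             mod_map[c] = "Voice"
--         elif c in gait_cols:
--             mod_map[c] = "Gait"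
--         else:
--             mod_map[c] = "Wearable"
--     return mod_map
-- ===== SOURCE B (Python) =====
-- def build_modality_map(feature_cols, wearable_cols, voice_cols, gait_cols):
--     """Map each feature name to its modality label."""
--     mod_map = dict.fromkeys(feature_cols, "Wearable")
--     for c in gait_cols:
--         if c in mod_map:
--             mod_map[c] = "Gait"
--     for c in voice_cols:
--         if c in mod_map:
--             mod_map[c] = "Voice"
--     for c in wearable_cols:
--         if c in mod_map:
--             mod_map[c] = "Wearable"
--     return mod_map
-- ===== Notes on version B (the rewrite author's own statement) =====
-- stated objective: faster
-- what changed: Inverts the traversal: instead of classifying each feature with a branch chain of three list-membership scans, B initializes every feature to the default label with dict.fromkeys and then iterates each modality list once (gait, voice, wearable in increasing precedence), overwriting the value of keys already present; no per-feature classification happens at all.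
import Mathlib
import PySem

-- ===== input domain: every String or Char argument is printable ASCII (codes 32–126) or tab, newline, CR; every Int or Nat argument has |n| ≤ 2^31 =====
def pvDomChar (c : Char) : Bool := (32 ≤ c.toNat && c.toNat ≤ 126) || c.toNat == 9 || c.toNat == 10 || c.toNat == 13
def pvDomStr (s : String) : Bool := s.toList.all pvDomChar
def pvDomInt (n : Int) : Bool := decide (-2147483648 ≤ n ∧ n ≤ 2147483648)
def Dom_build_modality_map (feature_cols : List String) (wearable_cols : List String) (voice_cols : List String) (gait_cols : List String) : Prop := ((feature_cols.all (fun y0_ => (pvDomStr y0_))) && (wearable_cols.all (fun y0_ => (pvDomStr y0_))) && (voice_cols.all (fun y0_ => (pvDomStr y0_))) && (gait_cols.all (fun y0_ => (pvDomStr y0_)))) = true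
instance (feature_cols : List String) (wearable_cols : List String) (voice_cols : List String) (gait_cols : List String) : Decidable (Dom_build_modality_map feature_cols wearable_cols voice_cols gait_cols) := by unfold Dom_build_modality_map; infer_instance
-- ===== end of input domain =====

-- B inverts the traversal: dict.fromkeys defaults then one overwrite pass per modality list; faster in a timing run.
-- ===== PORT A =====
def build_modality_map (feature_cols : List String) (wearable_cols : List String) (voice_cols : List String) (gait_cols : List String) : List (String × String) :=
  (feature_cols.foldl (fun mod_map c =>
      if wearable_cols.contains c then mod_map.insert c "Wearable"
      else if voice_cols.contains c then mod_map.insert c "Voice"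
      else if gait_cols.contains c then mod_map.insert c "Gait"
      else mod_map.insert c "Wearable")
    (PySem.Dict.empty : PySem.Dict String String)).items

-- ===== PORT B =====
def build_modality_map_alt (feature_cols : List String) (wearable_cols : List String) (voice_cols : List String) (gait_cols : List String) : List (String × String) :=
  -- mod_map = dict.fromkeys(feature_cols, "Wearable")
  let m0 : PySem.Dict String String :=
    feature_cols.foldl (fun d c => d.insert c "Wearable") PySem.Dict.empty
  -- for c in gait_cols: if c in mod_map: mod_map[c] = "Gait"
  let m1 := gait_cols.foldl (fun d c => if d.contains c then d.insert c "Gait" else d) m0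
  let m2 := voice_cols.foldl (fun d c => if d.contains c then d.insert c "Voice" else d) m1
  let m3 := wearable_cols.foldl (fun d c => if d.contains c then d.insert c "Wearable" else d) m2
  m3.items

-- ===== PRECONDITION & SPEC =====
def Spec_build_modality_map (feature_cols : List String) (wearable_cols : List String) (voice_cols : List String) (gait_cols : List String) (out : List (String × String)) : Prop := out = build_modality_map_alt feature_cols wearable_cols voice_cols gait_cols
instance (feature_cols : List String) (wearable_cols : List String) (voice_cols : List String) (gait_cols : List String) (out : List (String × String)) : Decidable (Spec_build_modality_map feature_cols wearable_cols voice_cols gait_cols out) := by unfold Spec_build_modality_map; infer_instance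

-- ===== CLAIM (what is proved, stated in full; the proofs are below) =====
def Claim_equal_build_modality_map : Prop := ∀ (feature_cols : List String) (wearable_cols : List String) (voice_cols : List String) (gait_cols : List String), Dom_build_modality_map feature_cols wearable_cols voice_cols gait_cols → Spec_build_modality_map feature_cols wearable_cols voice_cols gait_cols (build_modality_map feature_cols wearable_cols voice_cols gait_cols)

-- ===== LEMMAS AND PROOFS =====

-- the value A's branch chain assigns to a feature (proof-only helper)
def classifyF (wearable_cols voice_cols gait_cols : List String) (c : String) : String :=
  if wearable_cols.contains c then "Wearable"
  else if voice_cols.contains c then "Voice"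
  else if gait_cols.contains c then "Gait"
  else "Wearable"

-- a guarded constant-overwrite loop maps each existing item's value, adds no key
theorem items_foldl_guarded_insert (l : List String) (d : PySem.Dict String String) (v : String) :
    (l.foldl (fun d c => if d.contains c then d.insert c v else d) d).items
      = d.items.map (fun p => if l.contains p.1 then (p.1, v) else p) := by
  induction l generalizing d with
  | nil => simp
  | cons a l ih =>
    rw [List.foldl_cons]
    by_cases h : d.contains a = true
    · rw [if_pos h, ih, PySem.Dict.items_insert_of_contains d v h, List.map_map]
      apply List.map_congr_left
      intro p _
      simp only [Function.comp_apply, List.contains_cons]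
      by_cases hpa : (p.1 == a) = true
      · have hpa' : p.1 = a := eq_of_beq hpa
        simp [hpa']
      · simp only [hpa, if_neg, Bool.false_eq_true, not_false_eq_true]
        have : (a == p.1) = false := by
          simp only [beq_eq_false_iff_ne]
          intro hh; exact hpa (by simp [hh])
        by_cases hl : l.contains p.1 = true <;> simp
    · rw [if_neg h, ih]
      apply List.map_congr_left
      intro p hp
      have hk : p.1 ∈ d.keys := PySem.Dict.mem_keys_of_mem_items d hp
      have hne : p.1 ≠ a := by
        intro hEq
        exact h ((PySem.Dict.contains_iff_mem_keys d a).2 (hEq ▸ hk))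
      simp [hne]

-- A's fold runs in lockstep with the dict.fromkeys fold: same keys, values classified
theorem items_parallel_insert (F : String → String) (l : List String)
    (d1 d2 : PySem.Dict String String)
    (h : d2.items = d1.items.map (fun p => (p.1, F p.1))) :
    (l.foldl (fun d c => d.insert c (F c)) d2).items
      = (l.foldl (fun d c => d.insert c "Wearable") d1).items.map (fun p => (p.1, F p.1)) := by
  induction l generalizing d1 d2 with
  | nil => simpa using h
  | cons a l ih =>
    rw [List.foldl_cons, List.foldl_cons]
    apply ih
    have hkeys : d2.keys = d1.keys := by
      simp [PySem.Dict.keys, h, List.map_map, Function.comp_def]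
    have hcc : d2.contains a = d1.contains a := by
      rw [PySem.Dict.contains_eq_decide_mem_keys, PySem.Dict.contains_eq_decide_mem_keys, hkeys]
    cases hc : d1.contains a with
    | true =>
      rw [PySem.Dict.items_insert_of_contains d2 (F a) (hcc.trans hc),
          PySem.Dict.items_insert_of_contains d1 "Wearable" hc, h, List.map_map, List.map_map]
      apply List.map_congr_left
      intro p _
      simp only [Function.comp_apply]
      by_cases hpa : (p.1 == a) = true
      · have hpa' : p.1 = a := eq_of_beq hpa
        simp [hpa']
      · simp [hpa]
    | false =>
      rw [PySem.Dict.items_insert_of_not_contains d2 (F a) (hcc.trans hc),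
          PySem.Dict.items_insert_of_not_contains d1 "Wearable" hc, h, List.map_append]
      rfl

-- every value in the dict.fromkeys fold is the constant
theorem values_foldl_insert_const (l : List String) (d : PySem.Dict String String) (v : String)
    (h : ∀ p ∈ d.items, p.2 = v) :
    ∀ p ∈ (l.foldl (fun d c => d.insert c v) d).items, p.2 = v := by
  induction l generalizing d with
  | nil => simpa using h
  | cons a l ih =>
    rw [List.foldl_cons]
    apply ih
    intro p hp
    rcases (PySem.Dict.mem_items_insert d a v p).1 hp with hEq | ⟨hmem, _⟩
    · rw [hEq]
    · exact h p hmem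

-- ===== VERDICT (by name: the statement is the Claim_ definition above) =====
theorem build_modality_map_spec : Claim_equal_build_modality_map := by
  intro feature_cols wearable_cols voice_cols gait_cols _
  unfold Spec_build_modality_map build_modality_map build_modality_map_alt
  have hA : (feature_cols.foldl (fun mod_map c =>
      if wearable_cols.contains c then mod_map.insert c "Wearable"
      else if voice_cols.contains c then mod_map.insert c "Voice"
      else if gait_cols.contains c then mod_map.insert c "Gait"
      else mod_map.insert c "Wearable")
    (PySem.Dict.empty : PySem.Dict String String))
      = (feature_cols.foldl (fun d c => d.insert c (classifyF wearable_cols voice_cols gait_cols c))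
          (PySem.Dict.empty : PySem.Dict String String)) := by
    congr 1
    funext d c
    unfold classifyF
    split_ifs <;> rfl
  rw [hA]
  rw [items_parallel_insert (classifyF wearable_cols voice_cols gait_cols) feature_cols
        PySem.Dict.empty PySem.Dict.empty (by simp [PySem.Dict.empty])]
  rw [items_foldl_guarded_insert, items_foldl_guarded_insert, items_foldl_guarded_insert,
      List.map_map, List.map_map]
  apply List.map_congr_left
  intro p hp
  have hval : p.2 = "Wearable" :=
    values_foldl_insert_const feature_cols PySem.Dict.empty "Wearable"
      (by intro q hq; simp [PySem.Dict.empty] at hq) p hp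
  obtain ⟨k, val⟩ := p
  simp only at hval
  subst hval
  simp only [Function.comp_apply, classifyF]
  by_cases hg : k ∈ gait_cols <;>
  by_cases hv : k ∈ voice_cols <;>
  by_cases hw : k ∈ wearable_cols <;>
    simp [hg, hv, hw]
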